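-- pv_equiv track=rewrite | github.com/Jobin-Nelson/learn | competitive_programming/2024/july/find-valid-matrix-given-row-and-column-sums.py | restoreMatrix
-- ===== SOURCE A (Python) =====
-- def restoreMatrix(rowSum: list[int], colSum: list[int]) -> list[list[int]]:
--     M, N = len(colSum), len(rowSum)
--
--     matrix = [[0]* M for _ in range(N)]
--
--     i, j = 0, 0
--
--     while i < N and j < M:
--         matrix[i][j] = min(rowSum[i], colSum[j])
--         rowSum[i] -= matrix[i][j]
--         colSum[j] -= matrix[i][j]
--         if rowSum[i] == 0:
--             i += 1
--         else:
--             j += 1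
--     return matrix
-- ===== SOURCE B (Python) =====
-- def restoreMatrix(rowSum: list[int], colSum: list[int]) -> list[list[int]]:
--     N, M = len(rowSum), len(colSum)
--
--     R, t = [], 0
--     for x in rowSum:
--         t += x
--         R.append(t)
--     C, t = [], 0
--     for x in colSum:
--         t += x
--         C.append(t)
--
--     cells = {}
--     i, j, prev = 0, 0, 0
--     while i < N and j < M:
--         cur = min(R[i], C[j])
--         cells[(i, j)] = cur - prev
--         prev = cur
--         if R[i] <= C[j]:
--             i += 1
--         else:
--             j += 1
--
--     matrix = [[0] * M for _ in range(N)]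
--     for (i, j), v in cells.items():
--         matrix[i][j] = v
--     return matrix
-- ===== Notes on version B (the rewrite author's own statement) =====
-- stated objective: alternative
-- what changed: Replaces the residual-mutating two-pointer walk over the argument lists with a closed-form reformulation: precompute prefix sums of rowSum and colSum, merge them by comparing R[i] <= C[j], emit each staircase cell as the difference of consecutive running minima into a sparse dict, and assemble the dense matrix at the end (no mutation of the arguments or of a preallocated matrix).
import Mathlib
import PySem

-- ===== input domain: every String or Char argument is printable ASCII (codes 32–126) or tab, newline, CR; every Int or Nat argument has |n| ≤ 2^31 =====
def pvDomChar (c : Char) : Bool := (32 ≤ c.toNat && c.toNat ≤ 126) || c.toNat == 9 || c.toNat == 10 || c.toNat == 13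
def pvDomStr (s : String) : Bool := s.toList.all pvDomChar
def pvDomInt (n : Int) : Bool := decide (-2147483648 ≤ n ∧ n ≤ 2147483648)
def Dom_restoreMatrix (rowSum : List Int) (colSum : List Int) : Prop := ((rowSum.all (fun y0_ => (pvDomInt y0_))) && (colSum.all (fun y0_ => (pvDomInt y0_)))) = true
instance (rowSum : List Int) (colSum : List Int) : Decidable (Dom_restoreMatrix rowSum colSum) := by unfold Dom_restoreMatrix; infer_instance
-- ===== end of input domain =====

-- B replaces A's residual-mutating two-pointer walk by prefix sums merged into a sparse dict of
-- staircase cells, assembled into the matrix at the end (alternative algorithm, same cost).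
-- Note: Python A mutates its rowSum/colSum arguments in place, B does not; the equivalence proved
-- here is about the RETURN value.

-- ===== PORT A =====
-- the while loop of A: state (i, j, rows, cols, mat); i, j only ever grow from 0, so they are Nat.
-- rowSum[i]/colSum[j]/matrix[i] reads and writes are always in range (i < N, j < M under the guard),
-- so List.getD/List.set are exact here.
def restoreMatrixLoop (N M : Nat) (i j : Nat) (rows cols : List Int)
    (mat : List (List Int)) : List (List Int) :=
  if h : i < N ∧ j < M then
    let v := min (rows.getD i 0) (cols.getD j 0)
    let mat' := mat.set i ((mat.getD i []).set j v)
    let rows' := rows.set i (rows.getD i 0 - v)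
    let cols' := cols.set j (cols.getD j 0 - v)
    if rows'.getD i 0 = 0 then
      restoreMatrixLoop N M (i + 1) j rows' cols' mat'
    else
      restoreMatrixLoop N M i (j + 1) rows' cols' mat'
  else mat
termination_by N + M - (i + j)
decreasing_by all_goals omega

def restoreMatrix (rowSum : List Int) (colSum : List Int) : List (List Int) :=
  let M := colSum.length
  let N := rowSum.length
  let matrix := List.replicate N (List.replicate M (0 : Int))
  restoreMatrixLoop N M 0 0 rowSum colSum matrix

-- ===== PORT B =====
-- the two prefix-sum accumulation loops of Source B (t running total, acc the built list)
def prefixSumsAux (l : List Int) (t : Int) (acc : List Int) : List Int :=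
  match l with
  | [] => acc
  | x :: xs => prefixSumsAux xs (t + x) (acc ++ [t + x])

-- the while loop of Source B: walk by comparing prefix sums, record each staircase cell in the dict
def restoreMatrixAltLoop (N M : Nat) (Rl Cl : List Int) (i j : Nat) (prev : Int)
    (cells : PySem.Dict (Nat × Nat) Int) : PySem.Dict (Nat × Nat) Int :=
  if h : i < N ∧ j < M then
    let cur := min (Rl.getD i 0) (Cl.getD j 0)
    let cells' := cells.insert (i, j) (cur - prev)
    if Rl.getD i 0 ≤ Cl.getD j 0 then
      restoreMatrixAltLoop N M Rl Cl (i + 1) j cur cells'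
    else
      restoreMatrixAltLoop N M Rl Cl i (j + 1) cur cells'
  else cells
termination_by N + M - (i + j)
decreasing_by all_goals omega

def restoreMatrix_alt (rowSum : List Int) (colSum : List Int) : List (List Int) :=
  let N := rowSum.length
  let M := colSum.length
  let Rl := prefixSumsAux rowSum 0 []
  let Cl := prefixSumsAux colSum 0 []
  let cells := restoreMatrixAltLoop N M Rl Cl 0 0 0 PySem.Dict.empty
  cells.items.foldl (fun mat p => mat.set p.1.1 ((mat.getD p.1.1 []).set p.1.2 p.2))
    (List.replicate N (List.replicate M (0 : Int)))

-- ===== PRECONDITION & SPEC =====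
def Spec_restoreMatrix (rowSum : List Int) (colSum : List Int) (out : List (List Int)) : Prop := out = restoreMatrix_alt rowSum colSum
instance (rowSum : List Int) (colSum : List Int) (out : List (List Int)) : Decidable (Spec_restoreMatrix rowSum colSum out) := by unfold Spec_restoreMatrix; infer_instance

-- ===== CLAIM (what is proved, stated in full; the proofs are below) =====
def Claim_equal_restoreMatrix : Prop := ∀ (rowSum : List Int) (colSum : List Int), Dom_restoreMatrix rowSum colSum → Spec_restoreMatrix rowSum colSum (restoreMatrix rowSum colSum)

-- ===== LEMMAS AND PROOFS =====

-- dense matrix read off from the sparse cell dict (B's final comprehension, as a function)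
def pvAssemble (N M : Nat) (cells : PySem.Dict (Nat × Nat) Int) : List (List Int) :=
  (List.range N).map (fun i => (List.range M).map (fun j => cells.getD (i, j) 0))

lemma pvAssemble_empty (N M : Nat) :
    pvAssemble N M PySem.Dict.empty = List.replicate N (List.replicate M (0 : Int)) := by
  simp [pvAssemble, PySem.Dict.getD_empty, List.map_const']

lemma take_succ_sum (l : List Int) (k : Nat) (hk : k < l.length) :
    (l.take (k + 1)).sum = (l.take k).sum + l.getD k 0 := by
  rw [List.getD_eq_getElem?_getD, List.getElem?_eq_getElem hk]
  exact List.sum_take_succ l k hk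

lemma prefixSumsAux_spec (l : List Int) : ∀ (t : Int) (acc : List Int),
    prefixSumsAux l t acc = acc ++ (List.range l.length).map (fun k => t + (l.take (k + 1)).sum) := by
  induction l with
  | nil => intro t acc; simp [prefixSumsAux]
  | cons x xs ih =>
    intro t acc
    rw [prefixSumsAux, ih]
    simp [List.length_cons, List.range_succ_eq_map, List.map_map, Function.comp_def, add_assoc,
      List.append_assoc]

lemma prefixSums_length (l : List Int) : (prefixSumsAux l 0 []).length = l.length := by
  simp [prefixSumsAux_spec]

lemma prefixSums_getD (l : List Int) (k : Nat) (hk : k < l.length) :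
    (prefixSumsAux l 0 []).getD k 0 = (l.take (k + 1)).sum := by
  rw [prefixSumsAux_spec]
  simp [List.getD, hk]

lemma pvAssemble_insert (N M : Nat) (cells : PySem.Dict (Nat × Nat) Int) (i j : Nat) (v : Int)
    (hi : i < N) (_hj : j < M) :
    pvAssemble N M (cells.insert (i, j) v)
      = (pvAssemble N M cells).set i (((pvAssemble N M cells).getD i []).set j v) := by
  have hrow : (pvAssemble N M cells).getD i []
      = (List.range M).map (fun j' => cells.getD (i, j') 0) := by
    rw [List.getD_eq_getElem?_getD, List.getElem?_eq_getElem (by simpa [pvAssemble] using hi)]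
    simp [pvAssemble]
  rw [hrow]
  apply List.ext_getElem
  · simp [pvAssemble]
  · intro k hk hk'
    have hkN : k < N := by simpa [pvAssemble] using hk
    rw [List.getElem_set]
    simp only [pvAssemble, List.getElem_map, List.getElem_range]
    by_cases hki : i = k
    · subst hki
      rw [if_pos rfl]
      apply List.ext_getElem
      · simp
      · intro q hq hq'
        have hqM : q < M := by simpa using hq
        rw [List.getElem_set]
        simp only [List.getElem_map, List.getElem_range]
        by_cases hqj : j = q
        · subst hqj
          rw [if_pos rfl, PySem.Dict.getD_insert, if_pos rfl]
        · rw [if_neg hqj, PySem.Dict.getD_insert,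
            if_neg (by simp only [Prod.mk.injEq]; exact fun h => hqj h.2.symm)]
    · rw [if_neg hki]
      apply List.map_congr_left
      intro q _
      rw [PySem.Dict.getD_insert,
        if_neg (by simp only [Prod.mk.injEq]; exact fun h => hki h.1.symm)]

lemma altLoop_inv (N M : Nat) (Rl Cl : List Int) : ∀ (fuel i j : Nat) (prev : Int)
    (cells : PySem.Dict (Nat × Nat) Int),
    fuel = N + M - (i + j) →
    (∀ p ∈ cells.items, p.1.1 < N ∧ p.1.2 < M) →
    cells.keys.Nodup →
    (∀ p ∈ (restoreMatrixAltLoop N M Rl Cl i j prev cells).items, p.1.1 < N ∧ p.1.2 < M) ∧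
      (restoreMatrixAltLoop N M Rl Cl i j prev cells).keys.Nodup := by
  intro fuel
  induction fuel using Nat.strong_induction_on with
  | _ fuel IH =>
    intro i j prev cells hfuel hb hn
    rw [restoreMatrixAltLoop]
    by_cases h : i < N ∧ j < M
    · obtain ⟨hi, hj⟩ := h
      simp only [dif_pos (And.intro hi hj)]
      have hb' : ∀ p ∈ (cells.insert (i, j)
          (min (Rl.getD i 0) (Cl.getD j 0) - prev)).items, p.1.1 < N ∧ p.1.2 < M := by
        intro p hp
        rcases (PySem.Dict.mem_items_insert _ _ _ _).1 hp with hpe | ⟨hpm, _⟩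
        · subst hpe; exact ⟨hi, hj⟩
        · exact hb p hpm
      have hn' := PySem.Dict.nodup_keys_insert cells ((i, j) : Nat × Nat)
        (min (Rl.getD i 0) (Cl.getD j 0) - prev) hn
      by_cases hab : Rl.getD i 0 ≤ Cl.getD j 0
      · rw [if_pos hab]
        exact IH (N + M - (i + 1 + j)) (by omega) (i + 1) j _ _ rfl hb' hn'
      · rw [if_neg hab]
        exact IH (N + M - (i + (j + 1))) (by omega) i (j + 1) _ _ rfl hb' hn'
    · simp only [dif_neg h]
      exact ⟨hb, hn⟩

lemma foldl_set_eq_assemble (N M : Nat) : ∀ (l : List ((Nat × Nat) × Int))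
    (d : PySem.Dict (Nat × Nat) Int), (∀ p ∈ l, p.1.1 < N ∧ p.1.2 < M) →
    l.foldl (fun mat p => mat.set p.1.1 ((mat.getD p.1.1 []).set p.1.2 p.2)) (pvAssemble N M d)
      = pvAssemble N M (l.foldl (fun d p => d.insert p.1 p.2) d) := by
  intro l
  induction l with
  | nil => intro d _; rfl
  | cons p l ih =>
    intro d hb
    obtain ⟨⟨pi, pj⟩, pv⟩ := p
    obtain ⟨h1, h2⟩ := hb ((pi, pj), pv) List.mem_cons_self
    simp only [List.foldl_cons]
    rw [← pvAssemble_insert N M d pi pj pv h1 h2]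
    exact ih (d.insert (pi, pj) pv) (fun q hq => hb q (List.mem_cons_of_mem _ hq))

lemma refold_items (d : PySem.Dict (Nat × Nat) Int) (h : d.keys.Nodup) :
    d.items.foldl (fun d' p => d'.insert p.1 p.2) PySem.Dict.empty = d := by
  apply PySem.Dict.ext
  rw [PySem.Dict.items_foldl_insert_fresh d.items (fun p => p.1) (fun p => p.2)
    PySem.Dict.empty (fun a _ => PySem.Dict.contains_empty a.1)
    (by simpa [PySem.Dict.keys] using h)]
  simp [PySem.Dict.empty]

lemma loop_sim (rowSum colSum Rl Cl : List Int)
    (_hRlen : Rl.length = rowSum.length) (_hClen : Cl.length = colSum.length)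
    (hR : ∀ k, k < rowSum.length → Rl.getD k 0 = (rowSum.take (k + 1)).sum)
    (hC : ∀ k, k < colSum.length → Cl.getD k 0 = (colSum.take (k + 1)).sum) :
    ∀ (fuel i j : Nat) (prev : Int) (rows cols : List Int)
      (cells : PySem.Dict (Nat × Nat) Int),
    fuel = rowSum.length + colSum.length - (i + j) →
    rows.length = rowSum.length → cols.length = colSum.length →
    (∀ k, k < rowSum.length → rows.getD k 0 =
      if k < i then 0 else if k = i then (rowSum.take (k + 1)).sum - prev else rowSum.getD k 0) →
    (∀ k, k < colSum.length → cols.getD k 0 =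
      if k < j then 0 else if k = j then (colSum.take (k + 1)).sum - prev else colSum.getD k 0) →
    restoreMatrixLoop rowSum.length colSum.length i j rows cols (pvAssemble rowSum.length colSum.length cells)
      = pvAssemble rowSum.length colSum.length
          (restoreMatrixAltLoop rowSum.length colSum.length Rl Cl i j prev cells) := by
  intro fuel
  induction fuel using Nat.strong_induction_on with
  | _ fuel IH =>
    intro i j prev rows cols cells hfuel hrows hcols hrinv hcinv
    rw [restoreMatrixLoop, restoreMatrixAltLoop]
    by_cases h : i < rowSum.length ∧ j < colSum.length
    · obtain ⟨hi, hj⟩ := h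
      simp only [dif_pos (And.intro hi hj)]
      set a := (rowSum.take (i + 1)).sum with ha
      set b := (colSum.take (j + 1)).sum with hb
      have hri : rows.getD i 0 = a - prev := by
        have := hrinv i hi; simpa using this
      have hcj : cols.getD j 0 = b - prev := by
        have := hcinv j hj; simpa using this
      have hRi : Rl.getD i 0 = a := hR i hi
      have hCj : Cl.getD j 0 = b := hC j hj
      have hv : min (rows.getD i 0) (cols.getD j 0) = min a b - prev := by
        rw [hri, hcj]; omega
      have hset : (rows.set i (rows.getD i 0 - min (rows.getD i 0) (cols.getD j 0))).getD i 0
          = (a - prev) - (min a b - prev) := by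
        rw [List.getD_eq_getElem?_getD, List.getElem?_set_self (by omega), hv, hri]; rfl
      by_cases hab : a ≤ b
      · -- row exhausted: A advances i; B compares Rl[i] ≤ Cl[j] and advances i
        have hzero : (rows.set i (rows.getD i 0 - min (rows.getD i 0) (cols.getD j 0))).getD i 0 = 0 := by
          rw [hset]; omega
        rw [if_pos hzero, if_pos (by rw [hRi, hCj]; exact hab)]
        have hmin : min a b = a := min_eq_left hab
        have hcurv : min (Rl.getD i 0) (Cl.getD j 0) = a := by rw [hRi, hCj, hmin]
        rw [hcurv]
        have hmat := pvAssemble_insert rowSum.length colSum.length cells i j (a - prev) hi hj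
        have hvval : min (rows.getD i 0) (cols.getD j 0) = a - prev := by rw [hv, hmin]
        rw [hvval] at hzero ⊢
        rw [← hmat]
        apply IH (rowSum.length + colSum.length - (i + 1 + j)) (by omega) (i + 1) j a
        · rfl
        · simpa using hrows
        · simpa using hcols
        · intro k hk
          by_cases hki : k = i
          · subst hki
            rw [if_pos (Nat.lt_succ_self k)]
            exact hzero
          · rw [List.getD_eq_getElem?_getD, List.getElem?_set_ne (fun hc => hki hc.symm), ← List.getD_eq_getElem?_getD]
            rw [hrinv k hk]
            by_cases hklt : k < i
            · simp [hklt, Nat.lt_succ_of_lt hklt]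
            · have hkgt : i < k := by omega
              rw [if_neg (by omega), if_neg hki, if_neg (by omega)]
              by_cases hki1 : k = i + 1
              · subst hki1
                rw [if_pos rfl, take_succ_sum rowSum (i + 1) hk]
                omega
              · rw [if_neg hki1]
        · intro k hk
          by_cases hkj : k = j
          · subst hkj
            rw [List.getD_eq_getElem?_getD, List.getElem?_set_self (by omega), hcj]
            simp only [Option.getD_some, lt_self_iff_false, if_false, if_true]
            omega
          · rw [List.getD_eq_getElem?_getD, List.getElem?_set_ne (fun hc => hkj hc.symm), ← List.getD_eq_getElem?_getD]
            rw [hcinv k hk]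
            by_cases hklt : k < j
            · simp [hklt]
            · rw [if_neg hklt, if_neg hkj, if_neg hklt, if_neg hkj]
      · -- column exhausted: A advances j; B advances j
        have hnz : ¬ (rows.set i (rows.getD i 0 - min (rows.getD i 0) (cols.getD j 0))).getD i 0 = 0 := by
          rw [hset]; omega
        rw [if_neg hnz, if_neg (by rw [hRi, hCj]; exact hab)]
        have hmin : min a b = b := min_eq_right (by omega)
        have hcurv : min (Rl.getD i 0) (Cl.getD j 0) = b := by rw [hRi, hCj, hmin]
        rw [hcurv]
        have hmat := pvAssemble_insert rowSum.length colSum.length cells i j (b - prev) hi hj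
        have hvval : min (rows.getD i 0) (cols.getD j 0) = b - prev := by rw [hv, hmin]
        rw [hvval]
        rw [← hmat]
        apply IH (rowSum.length + colSum.length - (i + (j + 1))) (by omega) i (j + 1) b
        · rfl
        · simpa using hrows
        · simpa using hcols
        · intro k hk
          by_cases hki : k = i
          · subst hki
            rw [List.getD_eq_getElem?_getD, List.getElem?_set_self (by omega), hri]
            simp only [Option.getD_some, lt_self_iff_false, if_false, if_true]
            omega
          · rw [List.getD_eq_getElem?_getD, List.getElem?_set_ne (fun hc => hki hc.symm), ← List.getD_eq_getElem?_getD]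
            rw [hrinv k hk]
            by_cases hklt : k < i
            · simp [hklt]
            · rw [if_neg hklt, if_neg hki, if_neg hklt, if_neg hki]
        · intro k hk
          by_cases hkj : k = j
          · subst hkj
            rw [List.getD_eq_getElem?_getD, List.getElem?_set_self (by omega), hcj,
              if_pos (Nat.lt_succ_self k)]
            simp only [Option.getD_some]
            omega
          · rw [List.getD_eq_getElem?_getD, List.getElem?_set_ne (fun hc => hkj hc.symm), ← List.getD_eq_getElem?_getD]
            rw [hcinv k hk]
            by_cases hklt : k < j
            · simp [hklt, Nat.lt_succ_of_lt hklt]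
            · have hkgt : j < k := by omega
              rw [if_neg (by omega), if_neg hkj, if_neg (by omega)]
              by_cases hkj1 : k = j + 1
              · subst hkj1
                rw [if_pos rfl, take_succ_sum colSum (j + 1) hk]
                omega
              · rw [if_neg hkj1]
    · simp only [dif_neg h]

-- ===== VERDICT (by name: the statement is the Claim_ definition above) =====
theorem restoreMatrix_spec : Claim_equal_restoreMatrix := by
  intro rowSum colSum _hdom
  unfold Spec_restoreMatrix restoreMatrix restoreMatrix_alt
  show restoreMatrixLoop rowSum.length colSum.length 0 0 rowSum colSum
      (List.replicate rowSum.length (List.replicate colSum.length 0))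
    = (restoreMatrixAltLoop rowSum.length colSum.length (prefixSumsAux rowSum 0 [])
        (prefixSumsAux colSum 0 []) 0 0 0 PySem.Dict.empty).items.foldl
        (fun mat p => mat.set p.1.1 ((mat.getD p.1.1 []).set p.1.2 p.2))
        (List.replicate rowSum.length (List.replicate colSum.length (0 : Int)))
  obtain ⟨hbounds, hnodup⟩ := altLoop_inv rowSum.length colSum.length
    (prefixSumsAux rowSum 0 []) (prefixSumsAux colSum 0 [])
    (rowSum.length + colSum.length) 0 0 0 PySem.Dict.empty rfl
    (by intro p hp; simp [PySem.Dict.empty] at hp)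
    (PySem.Dict.nodup_keys_empty)
  rw [← pvAssemble_empty rowSum.length colSum.length,
    foldl_set_eq_assemble rowSum.length colSum.length _ _ hbounds,
    refold_items _ hnodup]
  apply loop_sim rowSum colSum _ _ (prefixSums_length rowSum) (prefixSums_length colSum)
    (fun k hk => prefixSums_getD rowSum k hk) (fun k hk => prefixSums_getD colSum k hk)
    (rowSum.length + colSum.length) 0 0 0 rowSum colSum PySem.Dict.empty rfl rfl rfl
  · intro k hk
    by_cases hk0 : k = 0
    · subst hk0
      simp [take_succ_sum rowSum 0 hk, List.getD]
    · simp [hk0]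
  · intro k hk
    by_cases hk0 : k = 0
    · subst hk0
      simp [take_succ_sum colSum 0 hk, List.getD]
    · simp [hk0]
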